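-- pv_equiv track=rewrite | github.com/VaHiX/CodeForces | Python/ByRound/1673/1673_F_Anti_Theft_Road_Planning.py | gan
-- ===== SOURCE A (Python) =====
-- def gan(x):
--     # Function to transform a number using base-4 representation
--     t = 1
--     r = 0
--     while x > 0:
--         r += x % 2 * t  # Extract least significant bit and multiply by power of 4
--         t *= 4          # Move to next power of 4
--         x //= 2         # Shift x right by 1 bit
--     return r
-- ===== SOURCE B (Python) =====
-- def gan(x):
--     # Spread the bits of x into even positions: bit i lands at 4**i.
--     # Done by interleaving a '0' between the binary digits and re-parsing.
--     if x <= 0: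
--         return 0
--     return int("0".join(bin(x)[2:]), 2)
-- ===== Notes on version B (the rewrite author's own statement) =====
-- stated objective: simpler
-- what changed: Replaces the LSB-first accumulation loop (maintaining a running power of 4) with a string transformation: interleave '0' between the binary digits of x and parse the result in base 2.
import Mathlib
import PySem

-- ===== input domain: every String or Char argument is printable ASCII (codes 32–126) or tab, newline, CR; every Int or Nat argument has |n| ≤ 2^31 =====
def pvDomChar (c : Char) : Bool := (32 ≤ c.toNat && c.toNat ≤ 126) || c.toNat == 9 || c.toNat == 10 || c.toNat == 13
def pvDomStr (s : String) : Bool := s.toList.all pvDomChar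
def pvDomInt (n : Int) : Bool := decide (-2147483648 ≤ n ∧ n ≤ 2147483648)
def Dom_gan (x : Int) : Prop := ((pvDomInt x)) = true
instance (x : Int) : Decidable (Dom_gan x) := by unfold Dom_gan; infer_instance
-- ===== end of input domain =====

-- B replaces A's LSB-first power-of-4 accumulation loop by a string transformation
-- (interleave '0' between the binary digits and reparse in base 2); objective: simpler.

-- ===== PORT A =====
-- the while loop, as structural recursion on x.toNat
def ganLoop (x t r : Int) : Int :=
  if _h : x > 0 then
    ganLoop (PySem.Int.floordiv x 2) (t * 4) (r + PySem.Int.mod x 2 * t)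
  else r
  termination_by x.toNat
  decreasing_by
    simp [PySem.Int.floordiv, Int.fdiv_eq_ediv]
    omega

def gan (x : Int) : Int := ganLoop x 1 0

-- ===== PORT B =====
-- bin(n)[2:] for n ≥ 1, as a list of '0'/'1' chars, MSB first
def binDigits : Nat → List Char
  | 0 => []
  | n + 1 => binDigits ((n + 1) / 2) ++ [if (n + 1) % 2 = 1 then '1' else '0']
  decreasing_by omega

-- int(s, 2) for a string of '0'/'1' chars: hand port, exact on such strings
def parseBin (l : List Char) : Int :=
  l.foldl (fun r c => r * 2 + (if c = '1' then 1 else 0)) 0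

def gan_alt (x : Int) : Int :=
  if x ≤ 0 then 0
  else parseBin (List.intersperse '0' (binDigits x.toNat))  -- "0".join(bin(x)[2:])

-- ===== PRECONDITION & SPEC =====
def Spec_gan (x : Int) (out : Int) : Prop := out = gan_alt x
instance (x : Int) (out : Int) : Decidable (Spec_gan x out) := by unfold Spec_gan; infer_instance

-- ===== CLAIM (what is proved, stated in full; the proofs are below) =====
def Claim_equal_gan : Prop := ∀ (x : Int), Dom_gan x → Spec_gan x (gan x)

-- ===== LEMMAS AND PROOFS =====

-- the mathematical value both programs compute: Σ bitᵢ(n)·4^i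
def spread : Nat → Nat
  | 0 => 0
  | n + 1 => (n + 1) % 2 + 4 * spread ((n + 1) / 2)
  decreasing_by omega

theorem ganLoop_spread (n : Nat) (t r : Int) :
    ganLoop (n : Int) t r = r + t * (spread n : Int) := by
  induction n using Nat.strong_induction_on generalizing t r with
  | _ n ih =>
    match n with
    | 0 => rw [ganLoop.eq_def]; simp [spread]
    | m + 1 =>
      have h1 : PySem.Int.floordiv ((m + 1 : Nat) : Int) 2 = (((m + 1) / 2 : Nat) : Int) :=
        PySem.Int.floordiv_natCast (m + 1) 2
      have h2 : PySem.Int.mod ((m + 1 : Nat) : Int) 2 = (((m + 1) % 2 : Nat) : Int) :=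
        PySem.Int.mod_natCast (m + 1) 2
      have hlt : (m + 1) / 2 < m + 1 := by omega
      rw [ganLoop.eq_def, dif_pos (by positivity : ((m + 1 : Nat) : Int) > 0), h1, h2,
        ih _ hlt,
        show spread (m + 1) = (m + 1) % 2 + 4 * spread ((m + 1) / 2) from by rw [spread]]
      push_cast
      ring

theorem binDigits_ne_nil (n : Nat) (h : 1 ≤ n) : binDigits n ≠ [] := by
  match n with
  | m + 1 => rw [binDigits]; simp

theorem intersperse_concat (xs : List Char) (c : Char) (h : xs ≠ []) :
    List.intersperse '0' (xs ++ [c]) = List.intersperse '0' xs ++ ['0', c] := by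
  induction xs with
  | nil => exact absurd rfl h
  | cons a xs ih =>
    cases xs with
    | nil => simp [List.intersperse]
    | cons b ys =>
      have : (a :: b :: ys) ++ [c] = a :: ((b :: ys) ++ [c]) := rfl
      rw [this]
      rw [show List.intersperse '0' (a :: (b :: ys ++ [c])) =
            a :: '0' :: List.intersperse '0' (b :: ys ++ [c]) from by
          cases ys <;> rfl]
      rw [ih (by simp)]
      rfl

theorem parseBin_spread (n : Nat) (h : 1 ≤ n) :
    parseBin (List.intersperse '0' (binDigits n)) = (spread n : Int) := by
  induction n using Nat.strong_induction_on with
  | _ n ih =>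
    match n with
    | m + 1 =>
      rw [binDigits.eq_def]
      by_cases hm : (m + 1) / 2 = 0
      · -- n = 1
        have : m = 0 := by omega
        subst this
        simp [binDigits, parseBin, spread]
      · have h1 : 1 ≤ (m + 1) / 2 := by omega
        rw [intersperse_concat _ _ (binDigits_ne_nil _ h1)]
        unfold parseBin
        rw [List.foldl_append]
        rw [show List.foldl (fun r c => r * 2 + (if c = '1' then 1 else 0)) 0
              (List.intersperse '0' (binDigits ((m + 1) / 2))) =
            parseBin (List.intersperse '0' (binDigits ((m + 1) / 2))) from rfl]
        rw [ih _ (by omega) h1]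
        rw [show spread (m + 1) = (m + 1) % 2 + 4 * spread ((m + 1) / 2) from by rw [spread]]
        rcases Nat.mod_two_eq_zero_or_one (m + 1) with h2 | h2 <;>
          simp [List.foldl, h2] <;> ring

-- ===== VERDICT (by name: the statement is the Claim_ definition above) =====
theorem gan_spec : Claim_equal_gan := by
  intro x _
  unfold Spec_gan gan gan_alt
  by_cases hx : x ≤ 0
  · rw [if_pos hx, ganLoop]
    simp
    omega
  · rw [if_neg hx]
    have hx' : (x.toNat : Int) = x := by omega
    have h1 : 1 ≤ x.toNat := by omega
    rw [← hx', ganLoop_spread]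
    simp only [Int.toNat_natCast]
    rw [parseBin_spread _ h1]
    ring
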